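-- pv_equiv track=rewrite | github.com/yfding98/EEG_SUAT_NEW | TUSZ/models/manifest_dataset.py | _channel_to_regions
-- ===== SOURCE A (Python) =====
-- from typing import Dict, List, Optional, Tuple
--
-- def _channel_to_regions(channel_name: str) -> List[str]:
--     """Map a channel/electrode name to one or more coarse brain regions."""
--     name = str(channel_name).strip().upper()
--     if not name:
--         return []
--     if '-' in name:
--         regions: List[str] = []
--         for part in name.split('-'):
--             regions.extend(_channel_to_regions(part))
--         return list(dict.fromkeys(regions))
--
--     if name.startswith('FP'):
--         return ['FP']
--     if name.startswith('F'):
--         return ['F']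
--     if name.startswith('C') or name == 'CZ':
--         return ['C']
--     if name.startswith('T'):
--         return ['T']
--     if name.startswith('P'):
--         return ['P']
--     if name.startswith('O'):
--         return ['O']
--     return []
-- ===== SOURCE B (Python) =====
-- from typing import List
--
-- _REGION = {'F': 'F', 'C': 'C', 'T': 'T', 'P': 'P', 'O': 'O'}
--
--
-- def _classify(tok: str) -> List[str]:
--     if tok[:2] == 'FP':
--         return ['FP']
--     r = _REGION.get(tok[:1])
--     return [] if r is None else [r]
--
--
-- def _channel_to_regions(channel_name: str) -> List[str]:
--     """Map a channel/electrode name to one or more coarse brain regions."""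
--     name = str(channel_name).strip().upper()
--     if not name:
--         return []
--     out: List[str] = []
--     for part in name.split('-'):
--         out.extend(_classify(part.strip()))
--     return list(dict.fromkeys(out))
-- ===== Notes on version B (the rewrite author's own statement) =====
-- stated objective: idiomatic
-- what changed: Replaces the self-recursion over hyphen-separated parts with one flat loop over the split parts, and replaces the prefix if-chain with a two-char frontal-pole slice test plus a first-letter dict lookup.
import Mathlib
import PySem

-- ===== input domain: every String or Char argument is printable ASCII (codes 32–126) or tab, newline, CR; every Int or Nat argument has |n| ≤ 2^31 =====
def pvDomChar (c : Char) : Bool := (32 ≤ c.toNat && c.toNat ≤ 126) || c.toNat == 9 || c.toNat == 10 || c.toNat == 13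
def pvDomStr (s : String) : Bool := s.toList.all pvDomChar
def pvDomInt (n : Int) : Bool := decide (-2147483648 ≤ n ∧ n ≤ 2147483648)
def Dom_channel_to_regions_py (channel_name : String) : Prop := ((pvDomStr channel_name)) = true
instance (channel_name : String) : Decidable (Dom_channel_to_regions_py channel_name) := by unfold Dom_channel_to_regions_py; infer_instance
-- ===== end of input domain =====

-- B replaces A's self-recursion over hyphen parts with one flat loop over the split and the
-- prefix if-chain with an 'FP' slice test plus a first-letter dict lookup (idiomatic, same cost).

-- ===== PORT A =====
-- A is self-recursive; the fuel argument only totalizes that recursion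
-- (channel_name.length + 1 is always enough: split parts are strictly shorter than a hyphenated name).
def channelToRegionsRec : Nat → String → List String
  | 0, _ => []
  | fuel+1, channel_name =>
    let name := PySem.Str.upper (PySem.Str.strip channel_name)
    if name.toList = [] then []
    else if PySem.Str.isIn "-" name then
      PySem.List.dedup (((PySem.Str.split? name "-").getD []).foldl
        (fun regions part => regions ++ channelToRegionsRec fuel part) [])
    else if PySem.Str.startswith name "FP" then ["FP"]
    else if PySem.Str.startswith name "F" then ["F"]
    else if PySem.Str.startswith name "C" || name == "CZ" then ["C"]
    else if PySem.Str.startswith name "T" then ["T"]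
    else if PySem.Str.startswith name "P" then ["P"]
    else if PySem.Str.startswith name "O" then ["O"]
    else []

def channel_to_regions_py (channel_name : String) : List String :=
  channelToRegionsRec (channel_name.toList.length + 1) channel_name

-- ===== PORT B =====
def pvRegionTable : PySem.Dict String String :=
  PySem.Dict.ofList [("F", "F"), ("C", "C"), ("T", "T"), ("P", "P"), ("O", "O")]

def pvClassify (tok : String) : List String :=
  if PySem.Str.slice tok none (some 2) == "FP" then ["FP"]
  else
    match pvRegionTable.get? (PySem.Str.slice tok none (some 1)) with
    | none => []
    | some r => [r]

def channel_to_regions_py_alt (channel_name : String) : List String :=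
  let name := PySem.Str.upper (PySem.Str.strip channel_name)
  if name.toList = [] then []
  else
    PySem.List.dedup (((PySem.Str.split? name "-").getD []).foldl
      (fun out part => out ++ pvClassify (PySem.Str.strip part)) [])

-- ===== PRECONDITION & SPEC =====
def Spec_channel_to_regions_py (channel_name : String) (out : List String) : Prop := out = channel_to_regions_py_alt channel_name
instance (channel_name : String) (out : List String) : Decidable (Spec_channel_to_regions_py channel_name out) := by unfold Spec_channel_to_regions_py; infer_instance

-- ===== CLAIM (what is proved, stated in full; the proofs are below) =====
def Claim_equal_channel_to_regions_py : Prop := ∀ (channel_name : String), Dom_channel_to_regions_py channel_name → Spec_channel_to_regions_py channel_name (channel_to_regions_py channel_name)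

-- ===== LEMMAS AND PROOFS =====


lemma pvCharLe (a b : Char) : (a ≤ b) ↔ a.toNat ≤ b.toNat := Iff.rfl

lemma pvOfNat_toNat {m : Nat} (h : Nat.isValidChar m) : (Char.ofNat m).toNat = m := by
  rw [Char.toNat_ofNat, if_pos h]

lemma pvIslower_iff (c : Char) : PySem.Chars.islower c = true ↔ 97 ≤ c.toNat ∧ c.toNat ≤ 122 := by
  simp [PySem.Chars.islower, pvCharLe]

lemma pvUpperChar_toNat (c : Char) (h : PySem.Chars.islower c = true) :
    (PySem.Chars.upperChar c).toNat = c.toNat - 32 := by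
  have := (pvIslower_iff c).1 h
  unfold PySem.Chars.upperChar
  rw [if_pos h, pvOfNat_toNat (by left; omega)]

lemma pvUpperChar_not_lower (c : Char) : PySem.Chars.islower (PySem.Chars.upperChar c) = false := by
  by_cases h : PySem.Chars.islower c = true
  · have h2 := (pvIslower_iff c).1 h
    have h3 := pvUpperChar_toNat c h
    rw [Bool.eq_false_iff]
    intro hcon
    have := (pvIslower_iff _).1 hcon
    omega
  · unfold PySem.Chars.upperChar
    rw [if_neg h]
    simpa using h

lemma pvUpperChar_fix (c : Char) : PySem.Chars.upperChar (PySem.Chars.upperChar c) = PySem.Chars.upperChar c := by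
  rw [show PySem.Chars.upperChar (PySem.Chars.upperChar c) =
      if PySem.Chars.islower (PySem.Chars.upperChar c) = true then
        Char.ofNat ((PySem.Chars.upperChar c).toNat - 32)
      else PySem.Chars.upperChar c from rfl]
  rw [pvUpperChar_not_lower]
  simp

lemma pvIsspace_iff (c : Char) : PySem.Chars.isspace c = true ↔
    (c.toNat = 32 ∨ (9 ≤ c.toNat ∧ c.toNat ≤ 13) ∨ (28 ≤ c.toNat ∧ c.toNat ≤ 31) ∨ c.toNat = 133 ∨ c.toNat = 160 ∨ c.toNat = 5760 ∨ (8192 ≤ c.toNat ∧ c.toNat ≤ 8202) ∨ c.toNat = 8232 ∨ c.toNat = 8233 ∨ c.toNat = 8239 ∨ c.toNat = 8287 ∨ c.toNat = 12288) := by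
  simp [PySem.Chars.isspace]
  tauto

lemma pvIsspace_upperChar (c : Char) : PySem.Chars.isspace (PySem.Chars.upperChar c) = PySem.Chars.isspace c := by
  by_cases h : PySem.Chars.islower c = true
  · have h2 := (pvIslower_iff c).1 h
    have h3 := pvUpperChar_toNat c h
    rw [Bool.eq_iff_iff, pvIsspace_iff, pvIsspace_iff]
    omega
  · unfold PySem.Chars.upperChar
    rw [if_neg h]


lemma pvStrip_subset {x : Char} {l : List Char} (h : x ∈ PySem.Chars.strip l) : x ∈ l := by
  unfold PySem.Chars.strip PySem.Chars.rstrip PySem.Chars.lstrip at h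
  rw [List.mem_reverse] at h
  have h1 := (List.dropWhile_suffix PySem.Chars.isspace).subset h
  rw [List.mem_reverse] at h1
  exact (List.dropWhile_suffix PySem.Chars.isspace).subset h1

-- lstrip is
-- lstrip is a no-op after strip
lemma pvLstrip_rstrip_lstrip (l : List Char) :
    PySem.Chars.lstrip (PySem.Chars.rstrip (PySem.Chars.lstrip l)) =
      PySem.Chars.rstrip (PySem.Chars.lstrip l) := by
  unfold PySem.Chars.lstrip PySem.Chars.rstrip
  set p := PySem.Chars.isspace
  set y := List.dropWhile p l with hy
  rcases hz : (List.dropWhile p y.reverse).reverse with _ | ⟨a, t⟩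
  · simp
  · -- a :: t is a prefix of y, so a = y.head fails p
    have hpre : (a :: t) <+: y := by
      rw [← hz]
      have := (List.dropWhile_suffix p (l := y.reverse)).reverse
      rwa [List.reverse_reverse] at this
    obtain ⟨rest, hrest⟩ := hpre
    have hna : ¬ p a = true := by
      have h2 : (List.dropWhile p l).head? = some a := by
        rw [← hy, show y = a :: (t ++ rest) by rw [← hrest]; simp]
        rfl
      have h3 := List.head?_dropWhile_not p l
      rw [h2] at h3
      simp [h3]
    exact List.dropWhile_cons_of_neg hna

lemma pvStrip_strip (l : List Char) :
    PySem.Chars.strip (PySem.Chars.strip l) = PySem.Chars.strip l := by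
  unfold PySem.Chars.strip
  rw [show PySem.Chars.lstrip (PySem.Chars.rstrip (PySem.Chars.lstrip l)) =
      PySem.Chars.rstrip (PySem.Chars.lstrip l) from pvLstrip_rstrip_lstrip l]
  unfold PySem.Chars.rstrip PySem.Chars.lstrip
  rw [List.reverse_reverse, List.dropWhile_idempotent]

lemma pvStrip_upper (l : List Char) :
    PySem.Chars.strip (PySem.Chars.upper l) = PySem.Chars.upper (PySem.Chars.strip l) := by
  have hp : (PySem.Chars.isspace ∘ PySem.Chars.upperChar) = PySem.Chars.isspace :=
    funext pvIsspace_upperChar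
  simp [PySem.Chars.strip, PySem.Chars.lstrip, PySem.Chars.rstrip, PySem.Chars.upper,
    List.dropWhile_map, hp, List.map_reverse]
  rw [← List.map_reverse, List.dropWhile_map, hp]

lemma pvStrip_upper_strip (l : List Char) :
    PySem.Chars.strip (PySem.Chars.upper (PySem.Chars.strip l)) = PySem.Chars.upper (PySem.Chars.strip l) := by
  rw [pvStrip_upper, pvStrip_strip]


lemma pvSplitOn_go_no_sep (c : Char) :
    ∀ (fuel : Nat) (l cur : List Char) (acc : List (List Char)), c ∉ l →
      PySem.Chars.splitOn.go [c] fuel l cur acc = ((cur.reverse ++ l) :: acc).reverse := by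
  intro fuel
  induction fuel with
  | zero => intro l cur acc _; simp [PySem.Chars.splitOn.go]
  | succ f ih =>
    intro l cur acc hl
    cases l with
    | nil => simp [PySem.Chars.splitOn.go]
    | cons a rest =>
      have ha : a ≠ c := by intro h; exact hl (h ▸ List.mem_cons_self)
      have hpre : [c].isPrefixOf (a :: rest) = false := by
        simp [List.isPrefixOf]
        exact fun h => absurd h.symm ha
      rw [show PySem.Chars.splitOn.go [c] (f+1) (a :: rest) cur acc =
          if [c].isPrefixOf (a :: rest) = true then
            PySem.Chars.splitOn.go [c] f (List.drop [c].length (a :: rest)) [] (cur.reverse :: acc)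
          else PySem.Chars.splitOn.go [c] f rest (a :: cur) acc from rfl]
      rw [if_neg (by simp [hpre])]
      rw [ih rest (a :: cur) acc (fun h => hl (List.mem_cons_of_mem _ h))]
      simp

lemma pvSplitOn_no_sep (c : Char) (l : List Char) (h : c ∉ l) :
    PySem.Chars.splitOn l [c] = [l] := by
  unfold PySem.Chars.splitOn
  rw [pvSplitOn_go_no_sep c _ l [] [] h]
  simp

lemma pvSplitOn_go_chars (c : Char) (Q : Char → Prop) :
    ∀ (fuel : Nat) (l cur : List Char) (acc : List (List Char)),
      l.length < fuel →
      (∀ x ∈ l, x ≠ c → Q x) →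
      (∀ x ∈ cur, Q x ∧ x ≠ c) →
      (∀ p ∈ acc, ∀ x ∈ p, Q x ∧ x ≠ c) →
      ∀ p ∈ PySem.Chars.splitOn.go [c] fuel l cur acc, ∀ x ∈ p, Q x ∧ x ≠ c := by
  intro fuel
  induction fuel with
  | zero => intro l cur acc hf; omega
  | succ f ih =>
    intro l cur acc hf hl hcur hacc
    cases l with
    | nil =>
      rw [show PySem.Chars.splitOn.go [c] (f+1) [] cur acc = (cur.reverse :: acc).reverse from rfl]
      intro p hp x hx
      rw [List.mem_reverse, List.mem_cons] at hp
      rcases hp with hp | hp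
      · exact hcur x (by rw [hp, List.mem_reverse] at hx; exact hx)
      · exact hacc p hp x hx
    | cons a rest =>
      rw [show PySem.Chars.splitOn.go [c] (f+1) (a :: rest) cur acc =
          if [c].isPrefixOf (a :: rest) = true then
            PySem.Chars.splitOn.go [c] f (List.drop [c].length (a :: rest)) [] (cur.reverse :: acc)
          else PySem.Chars.splitOn.go [c] f rest (a :: cur) acc from rfl]
      by_cases hpre : [c].isPrefixOf (a :: rest) = true
      · rw [if_pos hpre]
        apply ih
        · simp at hf ⊢; omega
        · intro x hx hxc
          exact hl x (List.mem_cons_of_mem _ (by simpa using hx)) hxc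
        · intro x hx; simp at hx
        · intro p hp x hx
          rw [List.mem_cons] at hp
          rcases hp with hp | hp
          · exact hcur x (by rw [hp, List.mem_reverse] at hx; exact hx)
          · exact hacc p hp x hx
      · rw [if_neg hpre]
        have ha : a ≠ c := by
          intro h; apply hpre; simp [List.isPrefixOf, h]
        apply ih
        · simp at hf ⊢; omega
        · exact fun x hx hxc => hl x (List.mem_cons_of_mem _ hx) hxc
        · intro x hx
          rw [List.mem_cons] at hx
          rcases hx with hx | hx
          · subst hx; exact ⟨hl x (List.mem_cons_self) ha, ha⟩
          · exact hcur x hx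
        · exact hacc

lemma pvSplitOn_chars (c : Char) (Q : Char → Prop) (l : List Char)
    (hl : ∀ x ∈ l, x ≠ c → Q x) :
    ∀ p ∈ PySem.Chars.splitOn l [c], ∀ x ∈ p, Q x ∧ x ≠ c := by
  unfold PySem.Chars.splitOn
  exact pvSplitOn_go_chars c Q (l.length + 1) l [] [] (by omega) hl (by simp) (by simp)

lemma pvOfList_eq_iff (l : List Char) (t : String) : (String.ofList l = t) ↔ l = t.toList := by
  rw [String.ext_iff, String.toList_ofList]

lemma pvSlice_ofList (l : List Char) (n : Int) (hn : 0 ≤ n) :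
    PySem.Str.slice (String.ofList l) none (some n) = String.ofList (l.take n.toNat) := by
  rw [String.ext_iff, PySem.Str.toList_slice, PySem.Chars.slice_eq_listSlice,
    PySem.List.slice_to _ hn, String.toList_ofList]
  rw [String.toList_ofList]

lemma pvTable_items : pvRegionTable.items = [("F", "F"), ("C", "C"), ("T", "T"), ("P", "P"), ("O", "O")] := by
  decide

lemma pvKeyBeq_single (t : String) (a c : Char) (ht : t.toList = [c]) (h : ¬ a = c) :
    (t == String.ofList [a]) = false := by
  rw [beq_eq_false_iff_ne]
  intro he
  apply h
  have h2 := congrArg String.toList he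
  rw [ht, String.toList_ofList] at h2
  exact (List.cons.injEq _ _ _ _ ▸ h2).1.symm

lemma pvChain_eq_classify (l : List Char) :
    (if PySem.Str.startswith (String.ofList l) "FP" then ["FP"]
     else if PySem.Str.startswith (String.ofList l) "F" then ["F"]
     else if PySem.Str.startswith (String.ofList l) "C" || String.ofList l == "CZ" then ["C"]
     else if PySem.Str.startswith (String.ofList l) "T" then ["T"]
     else if PySem.Str.startswith (String.ofList l) "P" then ["P"]
     else if PySem.Str.startswith (String.ofList l) "O" then ["O"]
     else []) = pvClassify (String.ofList l) := by
  unfold pvClassify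
  rw [pvSlice_ofList l 2 (by norm_num), pvSlice_ofList l 1 (by norm_num)]
  simp only [PySem.Str.startswith_eq, String.toList_ofList, PySem.Chars.startswith,
    beq_iff_eq, PySem.Dict.get?, pvTable_items]
  match l with
  | [] => simp
  | [a] =>
    by_cases hF : a = 'F'
    · subst hF; decide
    by_cases hC : a = 'C'
    · subst hC; decide
    by_cases hT : a = 'T'
    · subst hT; decide
    by_cases hP : a = 'P'
    · subst hP; decide
    by_cases hO : a = 'O'
    · subst hO; decide
    simp [List.isPrefixOf, pvOfList_eq_iff, hF, hC,
      Ne.symm hF, Ne.symm hC, Ne.symm hT, Ne.symm hP, Ne.symm hO,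
      pvKeyBeq_single "F" a 'F' (by decide) hF, pvKeyBeq_single "C" a 'C' (by decide) hC,
      pvKeyBeq_single "T" a 'T' (by decide) hT, pvKeyBeq_single "P" a 'P' (by decide) hP,
      pvKeyBeq_single "O" a 'O' (by decide) hO]
  | a :: b :: rest =>
    by_cases hF : a = 'F'
    · subst hF
      by_cases hP2 : b = 'P'
      · subst hP2
        simp [List.isPrefixOf]
      · simp [List.isPrefixOf, pvOfList_eq_iff, List.find?, hP2, Ne.symm hP2]
    by_cases hC : a = 'C'
    · subst hC
      simp [List.isPrefixOf, pvOfList_eq_iff, List.find?, hF]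
    by_cases hT : a = 'T'
    · subst hT
      simp [List.isPrefixOf, pvOfList_eq_iff, List.find?]
    by_cases hP : a = 'P'
    · subst hP
      simp [List.isPrefixOf, pvOfList_eq_iff, List.find?]
    by_cases hO : a = 'O'
    · subst hO
      simp [List.isPrefixOf, pvOfList_eq_iff, List.find?]
    simp [List.isPrefixOf, pvOfList_eq_iff, hF, hC,
      Ne.symm hF, Ne.symm hC, Ne.symm hT, Ne.symm hP, Ne.symm hO,
      pvKeyBeq_single "F" a 'F' (by decide) hF, pvKeyBeq_single "C" a 'C' (by decide) hC,
      pvKeyBeq_single "T" a 'T' (by decide) hT, pvKeyBeq_single "P" a 'P' (by decide) hP,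
      pvKeyBeq_single "O" a 'O' (by decide) hO]

lemma pvIsIn_hyphen (s : String) : PySem.Str.isIn "-" s = true ↔ '-' ∈ s.toList := by
  rw [PySem.Str.isIn_iff_infix, show ("-" : String).toList = ['-'] by decide]
  exact List.singleton_infix_iff '-' s.toList

lemma pvClassify_len_le (t : String) : (pvClassify t).length ≤ 1 := by
  unfold pvClassify
  split
  · simp
  · split <;> simp

lemma pvDedup_short (xs : List String) (h : xs.length ≤ 1) : PySem.List.dedup xs = xs := by
  match xs with
  | [] => decide
  | [x] => simp [PySem.List.dedup, PySem.Set.ofList, PySem.Set.add, PySem.Set.empty]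
  | x :: y :: t => simp at h

lemma pvToList_nm (s : String) :
    (PySem.Str.upper (PySem.Str.strip s)).toList = PySem.Chars.upper (PySem.Chars.strip s.toList) := by
  rw [PySem.Str.toList_upper, PySem.Str.toList_strip]

lemma pvRec_no_hyphen (f : Nat) (s : String)
    (h : '-' ∉ (PySem.Str.upper (PySem.Str.strip s)).toList) :
    channelToRegionsRec (f+1) s = pvClassify (PySem.Str.upper (PySem.Str.strip s)) := by
  set nm := PySem.Str.upper (PySem.Str.strip s) with hnm
  have hh : PySem.Str.isIn "-" nm = false := by
    rw [Bool.eq_false_iff]; intro hcon; exact h ((pvIsIn_hyphen _).1 hcon)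
  rw [show channelToRegionsRec (f+1) s =
      (if nm.toList = [] then []
       else if PySem.Str.isIn "-" nm then
         PySem.List.dedup (((PySem.Str.split? nm "-").getD []).foldl
           (fun regions part => regions ++ channelToRegionsRec f part) [])
       else if PySem.Str.startswith nm "FP" then ["FP"]
       else if PySem.Str.startswith nm "F" then ["F"]
       else if PySem.Str.startswith nm "C" || nm == "CZ" then ["C"]
       else if PySem.Str.startswith nm "T" then ["T"]
       else if PySem.Str.startswith nm "P" then ["P"]
       else if PySem.Str.startswith nm "O" then ["O"]
       else []) from rfl]
  by_cases he : nm.toList = []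
  · rw [if_pos he]
    rw [show nm = String.ofList nm.toList by rw [String.ofList_toList], he]
    decide
  · rw [if_neg he, if_neg (by rw [hh]; simp)]
    rw [show nm = String.ofList nm.toList by rw [String.ofList_toList]]
    exact pvChain_eq_classify nm.toList

theorem pvMain (s : String) : channel_to_regions_py s = channel_to_regions_py_alt s := by
  unfold channel_to_regions_py channel_to_regions_py_alt
  set nm := PySem.Str.upper (PySem.Str.strip s) with hnm
  by_cases hh : PySem.Str.isIn "-" nm = true
  · -- hyphenated: nm is nonempty
    have he : nm.toList ≠ [] := by
      intro hcon
      have := (pvIsIn_hyphen nm).1 hh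
      rw [hcon] at this; simp at this
    have hslen : s.toList ≠ [] := by
      intro hcon
      apply he
      rw [pvToList_nm, hcon]
      decide
    obtain ⟨m, hm⟩ : ∃ m, s.toList.length = m + 1 := by
      cases hs : s.toList with
      | nil => exact absurd hs hslen
      | cons a t => exact ⟨t.length, by simp⟩
    rw [hm]
    rw [show channelToRegionsRec (m+1+1) s =
        (if nm.toList = [] then []
         else if PySem.Str.isIn "-" nm then
           PySem.List.dedup (((PySem.Str.split? nm "-").getD []).foldl
             (fun regions part => regions ++ channelToRegionsRec (m+1) part) [])
         else if PySem.Str.startswith nm "FP" then ["FP"]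
         else if PySem.Str.startswith nm "F" then ["F"]
         else if PySem.Str.startswith nm "C" || nm == "CZ" then ["C"]
         else if PySem.Str.startswith nm "T" then ["T"]
         else if PySem.Str.startswith nm "P" then ["P"]
         else if PySem.Str.startswith nm "O" then ["O"]
         else []) from rfl]
    rw [if_neg (by simpa using he), if_pos hh]
    simp only [if_neg (show ¬ nm.toList = [] from he)]
    have hsplit : (PySem.Str.split? nm "-").getD [] =
        (PySem.Chars.splitOn nm.toList ['-']).map String.ofList := by
      rw [PySem.Str.split?, show ("-" : String).toList = ['-'] by decide,
        PySem.Chars.split?]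
      simp
    rw [hsplit]
    refine congrArg PySem.List.dedup ?_
    have hQ := pvSplitOn_chars '-' (fun x => PySem.Chars.upperChar x = x) nm.toList ?hl
    case hl =>
      intro x hx _
      rw [pvToList_nm] at hx
      rw [PySem.Chars.upper, List.mem_map] at hx
      obtain ⟨y, _, rfl⟩ := hx
      exact pvUpperChar_fix y
    apply PySem.List.foldl_congr_mem
    intro acc part hpart
    rw [List.mem_map] at hpart
    obtain ⟨q, hq, rfl⟩ := hpart
    have hqp := hQ q hq
    refine congrArg (fun r => acc ++ r) ?_
    have hqsub : ∀ x ∈ (PySem.Str.upper (PySem.Str.strip (String.ofList q))).toList, x ∈ q := by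
      intro x hx
      rw [pvToList_nm, String.toList_ofList, PySem.Chars.upper, List.mem_map] at hx
      obtain ⟨y, hy, rfl⟩ := hx
      have hyq := pvStrip_subset hy
      rw [(hqp y hyq).1]
      exact hyq
    have hnoh : '-' ∉ (PySem.Str.upper (PySem.Str.strip (String.ofList q))).toList := by
      intro hcon
      exact (hqp '-' (hqsub '-' hcon)).2 rfl
    rw [pvRec_no_hyphen m (String.ofList q) hnoh]
    have hfix : PySem.Str.upper (PySem.Str.strip (String.ofList q)) =
        PySem.Str.strip (String.ofList q) := by
      rw [String.ext_iff, pvToList_nm, String.toList_ofList, PySem.Str.toList_strip,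
        String.toList_ofList, PySem.Chars.upper]
      conv_rhs => rw [← List.map_id (PySem.Chars.strip q)]
      apply List.map_congr_left
      intro x hx
      exact (hqp x (pvStrip_subset hx)).1
    rw [hfix]
  · -- no hyphen
    have hnoh : '-' ∉ nm.toList := fun hcon => hh ((pvIsIn_hyphen nm).2 hcon)
    rw [show s.toList.length + 1 = s.toList.length + 1 from rfl]
    rw [show channelToRegionsRec (s.toList.length+1) s = pvClassify nm from
      pvRec_no_hyphen s.toList.length s hnoh]
    by_cases he : nm.toList = []
    · rw [if_pos he]
      rw [show nm = String.ofList nm.toList by rw [String.ofList_toList], he]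
      decide
    · rw [if_neg he]
      have hsplit : (PySem.Str.split? nm "-").getD [] = [nm] := by
        rw [PySem.Str.split?, show ("-" : String).toList = ['-'] by decide,
          PySem.Chars.split?]
        simp [pvSplitOn_no_sep '-' nm.toList hnoh]
      rw [hsplit]
      simp only [List.foldl, List.nil_append]
      have hstripnm : PySem.Str.strip nm = nm := by
        rw [String.ext_iff, PySem.Str.toList_strip, pvToList_nm, pvStrip_upper_strip]
      rw [hstripnm]
      exact (pvDedup_short _ (pvClassify_len_le nm)).symm

-- ===== VERDICT (by name: the statement is the Claim_ definition above) =====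
theorem channel_to_regions_py_spec : Claim_equal_channel_to_regions_py := by
  intro channel_name _
  unfold Spec_channel_to_regions_py
  exact pvMain channel_name
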